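-- pv_equiv track=rewrite | github.com/Fansesi/guitar_playability | playability.py | retr_indexes_elems
-- ===== SOURCE A (Python) =====
-- from typing import List, Dict, Optional, Union, Any, Tuple
--
-- def retr_indexes_elems(a_list: List[int]) -> Tuple[List[int], List[int]]:
--     """Returns the index of the element which is not -1 in a list shaped like [-1, -1, -1, -1, 12, -1, -1]."""
--     index = [-1]
--     element = [-1]
--     # lg.debug(a_list)
--     for i, elem in enumerate(a_list):
--         if elem != -1:
--             if -1 in index and -1 in element:
--                 # All these -1 stuff because I don't want to mess up with the Tuple[List[int], List[int]] with optionals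
--                 index.remove(-1)
--                 element.remove(-1)
--             index.append(i)
--             element.append(elem)
--
--     # I'm even putting this statement here to show something like this never going to happen
--     assert index != [-1]
--
--     return index, element
-- ===== SOURCE B (Python) =====
-- def retr_indexes_elems(a_list):
--     """Returns the index of the element which is not -1 in a list shaped like [-1, -1, -1, -1, 12, -1, -1]."""
--     # Stage 1: positions whose entry is not -1.
--     index = [i for i in range(len(a_list)) if a_list[i] != -1]
--     # A's final assert raises exactly when nothing survived; keep that behaviour.
--     assert index
--     # Stage 2: gather the values by random access into the original list.
--     element = [a_list[i] for i in index]
--     return index, element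
-- ===== Notes on version B (the rewrite author's own statement) =====
-- stated objective: faster
-- what changed: B is a two-stage computation: first a pass over range(len) collects the surviving positions, then a second gather pass indexes back into the original list to fetch the values, replacing A's single loop that grows two parallel accumulators seeded with a -1 sentinel and rescans them with '-1 in index and -1 in element' on every kept element; Pre_ excludes lists with no element different from -1, on which A's assert raises AssertionError (B's assert raises there too).
import Mathlib
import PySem

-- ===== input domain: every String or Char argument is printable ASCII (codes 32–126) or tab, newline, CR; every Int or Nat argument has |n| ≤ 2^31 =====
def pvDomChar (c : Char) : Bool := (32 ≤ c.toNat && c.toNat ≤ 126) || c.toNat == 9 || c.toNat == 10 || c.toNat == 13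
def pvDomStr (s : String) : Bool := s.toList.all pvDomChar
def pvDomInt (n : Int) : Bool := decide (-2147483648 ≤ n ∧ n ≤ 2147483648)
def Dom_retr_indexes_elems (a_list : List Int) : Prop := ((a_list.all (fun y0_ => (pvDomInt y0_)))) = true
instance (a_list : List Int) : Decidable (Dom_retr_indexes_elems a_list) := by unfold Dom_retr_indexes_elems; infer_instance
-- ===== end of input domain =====

-- B stages the work: one pass collects the surviving positions, a second gather pass indexes back
-- into the list for the values, instead of A's single loop over two sentinel-seeded parallel
-- accumulators rescanned by '-1 in' membership tests; objective: faster. Pre_ excludes inputs where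
-- A's assert raises (no element ≠ -1); B raises there too.


-- ===== PORT A =====
-- one step of A's for-loop body over the pair (i, elem)
def retrStepA (st : List Int × List Int) (p : Int × Int) : List Int × List Int :=
  if p.2 ≠ -1 then
    let st' :=
      if (-1 : Int) ∈ st.1 ∧ (-1 : Int) ∈ st.2 then
        -- index.remove(-1); element.remove(-1)  (guarded by the membership test, so remove? is some)
        (((PySem.List.remove? st.1 (-1)).getD st.1), ((PySem.List.remove? st.2 (-1)).getD st.2))
      else st
    (st'.1 ++ [p.1], st'.2 ++ [p.2])
  else st

def retr_indexes_elems (a_list : List Int) : List Int × List Int :=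
  (PySem.List.enumerate a_list).foldl retrStepA ([-1], [-1])
  -- the final 'assert index != [-1]' raises exactly outside Pre_

-- ===== PORT B =====
def retr_indexes_elems_alt (a_list : List Int) : List Int × List Int :=
  -- stage 1: [i for i in range(len(a_list)) if a_list[i] != -1]
  -- (every i drawn from range(len) is in range, so pyGetD is exact here)
  let index := (PySem.List.pyRange 0 a_list.length 1).filter
    (fun i => PySem.List.pyGetD a_list i (-1) ≠ -1)
  -- 'assert index' raises exactly outside Pre_
  -- stage 2: [a_list[i] for i in index]
  let element := index.map (fun i => PySem.List.pyGetD a_list i (-1))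
  (index, element)

-- ===== PRECONDITION & SPEC =====
-- Pre_ excludes exactly the inputs with no element different from -1, on which A's assert raises AssertionError.
def Pre_retr_indexes_elems (a_list : List Int) : Prop := ∃ x ∈ a_list, x ≠ -1
instance (a_list : List Int) : Decidable (Pre_retr_indexes_elems a_list) := by unfold Pre_retr_indexes_elems; infer_instance
def pvWitness_retr_indexes_elems : List Int := [-1, 12, -1]
def Spec_retr_indexes_elems (a_list : List Int) (out : List Int × List Int) : Prop := out = retr_indexes_elems_alt a_list
instance (a_list : List Int) (out : List Int × List Int) : Decidable (Spec_retr_indexes_elems a_list out) := by unfold Spec_retr_indexes_elems; infer_instance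

-- ===== CLAIM (what is proved, stated in full; the proofs are below) =====
def Claim_equal_retr_indexes_elems : Prop := ∀ (a_list : List Int), Dom_retr_indexes_elems a_list → Pre_retr_indexes_elems a_list → Spec_retr_indexes_elems a_list (retr_indexes_elems a_list)

-- ===== LEMMAS AND PROOFS =====

-- once the sentinel is gone (-1 in neither accumulator), A's fold just appends the kept pairs
theorem foldA_started (l : List (Int × Int)) (ia ea : List Int)
    (hia : (-1 : Int) ∉ ia) (hea : (-1 : Int) ∉ ea)
    (hl : ∀ p ∈ l, (0 : Int) ≤ p.1) :
    l.foldl retrStepA (ia, ea)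
      = (ia ++ (l.filter (fun p => p.2 ≠ -1)).map (·.1),
         ea ++ (l.filter (fun p => p.2 ≠ -1)).map (·.2)) := by
  induction l generalizing ia ea with
  | nil => simp
  | cons p t ih =>
    have hp0 : (0 : Int) ≤ p.1 := hl p (by simp)
    have ht : ∀ q ∈ t, (0 : Int) ≤ q.1 := fun q hq => hl q (by simp [hq])
    by_cases hp : p.2 ≠ -1
    · have hstep : retrStepA (ia, ea) p = (ia ++ [p.1], ea ++ [p.2]) := by
        simp [retrStepA, hp, hia, hea]
      rw [List.foldl_cons, hstep,
        ih (ia ++ [p.1]) (ea ++ [p.2])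
          (by simp [hia]; omega) (by simp [hea]; exact fun h => hp h.symm) ht]
      simp [hp]
    · have hstep : retrStepA (ia, ea) p = (ia, ea) := by simp [retrStepA, hp]
      rw [List.foldl_cons, hstep, ih ia ea hia hea ht]
      simp [hp]

-- from the sentinel state, A's fold computes the projections of the kept pairs (or stays at the sentinel)
theorem foldA_init (l : List (Int × Int)) (hl : ∀ p ∈ l, (0 : Int) ≤ p.1) :
    l.foldl retrStepA ([-1], [-1])
      = if (l.filter (fun p => p.2 ≠ -1)) = [] then ([-1], [-1])
        else ((l.filter (fun p => p.2 ≠ -1)).map (·.1),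
              (l.filter (fun p => p.2 ≠ -1)).map (·.2)) := by
  induction l with
  | nil => simp
  | cons p t ih =>
    have hp0 : (0 : Int) ≤ p.1 := hl p (by simp)
    have ht : ∀ q ∈ t, (0 : Int) ≤ q.1 := fun q hq => hl q (by simp [hq])
    by_cases hp : p.2 ≠ -1
    · have hstep : retrStepA ([-1], [-1]) p = ([p.1], [p.2]) := by
        simp [retrStepA, hp]
      rw [List.foldl_cons, hstep,
        foldA_started t [p.1] [p.2] (by simp; omega) (by simp; exact fun h => hp h.symm) ht]
      simp [hp]
    · have hstep : retrStepA ([-1], [-1]) p = ([-1], [-1]) := by simp [retrStepA, hp]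
      have hf : (p :: t).filter (fun p => p.2 ≠ -1) = t.filter (fun p => p.2 ≠ -1) := by
        simp [hp]
      rw [List.foldl_cons, hstep, ih ht, hf]

theorem enum_fst_nonneg (xs : List Int) :
    ∀ p ∈ PySem.List.enumerate xs, (0 : Int) ≤ p.1 := by
  intro p hp
  rcases (PySem.List.mem_enumerate_iff _ _ _).1 hp with ⟨k, hk, rfl⟩
  positivity

-- indexing the list at an enumerate-pair's index returns its value
theorem enum_getD (xs : List Int) :
    ∀ p ∈ PySem.List.enumerate xs, PySem.List.pyGetD xs p.1 (-1) = p.2 := by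
  intro p hp
  rcases (PySem.List.mem_enumerate_iff _ _ _).1 hp with ⟨k, hk, rfl⟩
  simp [List.getD, hk]

-- B's two stages equal the two projections of the filtered enumeration
theorem alt_eq_proj (xs : List Int) :
    retr_indexes_elems_alt xs
      = (((PySem.List.enumerate xs).filter (fun p => p.2 ≠ -1)).map (·.1),
         ((PySem.List.enumerate xs).filter (fun p => p.2 ≠ -1)).map (·.2)) := by
  unfold retr_indexes_elems_alt
  have hrange : PySem.List.pyRange 0 (xs.length : Int) 1
      = (PySem.List.enumerate xs).map (·.1) := by
    rw [PySem.List.map_fst_enumerate]; norm_num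
  have hfim : (PySem.List.pyRange 0 (xs.length : Int) 1).filter
        (fun i => PySem.List.pyGetD xs i (-1) ≠ -1)
      = ((PySem.List.enumerate xs).filter (fun p => p.2 ≠ -1)).map (·.1) := by
    rw [hrange, List.filter_map]
    congr 1
    refine List.filter_congr ?_
    intro p hp
    simp [Function.comp, enum_getD xs p hp]
  simp only [hfim]
  congr 1
  rw [List.map_map]
  refine List.map_congr_left ?_
  intro p hp
  have hmem : p ∈ PySem.List.enumerate xs := (List.mem_filter.1 hp).1
  simp [Function.comp, enum_getD xs p hmem]

-- ===== VERDICT (by name: the statement is the Claim_ definition above) =====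
theorem retr_indexes_elems_spec : Claim_equal_retr_indexes_elems := by
  intro a_list _ hpre
  unfold Spec_retr_indexes_elems retr_indexes_elems
  rw [foldA_init _ (enum_fst_nonneg a_list), alt_eq_proj]
  have hne : (PySem.List.enumerate a_list).filter (fun p => p.2 ≠ -1) ≠ [] := by
    rcases hpre with ⟨x, hx, hxne⟩
    rcases List.getElem_of_mem hx with ⟨k, hk, rfl⟩
    intro hnil
    have hmem : ((k : Int), a_list[k]) ∈ (PySem.List.enumerate a_list).filter (fun p => p.2 ≠ -1) :=
      List.mem_filter.2 ⟨(PySem.List.mem_enumerate_iff _ _ _).2 ⟨k, hk, by simp⟩, by simpa using hxne⟩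
    rw [hnil] at hmem
    exact absurd hmem (List.not_mem_nil)
  rw [if_neg hne]
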